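-- pv_equiv track=rewrite | github.com/anhducpn67/CRE_Biomedical | data/PPI/code/1_all.py | generated_BIOES
-- ===== SOURCE A (Python) =====
-- def generated_BIOES(tagged_index_list, temp_list):
--     if len(tagged_index_list) == 0:
--         temp_list = temp_list
--     if len(tagged_index_list) == 1:
--         temp_list[tagged_index_list[0]] = "S"
--     if len(tagged_index_list) == 2:
--         temp_list[tagged_index_list[0]] = "B"
--         temp_list[tagged_index_list[1]] = "E"
--     if len(tagged_index_list) > 2:
--         temp_list[tagged_index_list[0]] = "B"
--         for i in tagged_index_list[1:-1]:
--             temp_list[i] = "I"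
--         temp_list[tagged_index_list[-1]] = "E"
--     return temp_list
-- ===== SOURCE B (Python) =====
-- def generated_BIOES(tagged_index_list, temp_list):
--     n = len(tagged_index_list)
--     if n == 1:
--         tags = "S"
--     elif n >= 2:
--         tags = "B" + "I" * (n - 2) + "E"
--     else:
--         tags = ""
--     for idx, tag in zip(tagged_index_list, tags):
--         temp_list[idx] = tag
--     return temp_list
-- ===== Notes on version B (the rewrite author's own statement) =====
-- stated objective: simpler
-- what changed: Replaces A's four length-based branches (with a slice loop for the middle) by building the whole BIOES tag sequence once ('S' or 'B'+'I'*(n-2)+'E') and assigning it in a single zip pass over the index list.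
import Mathlib
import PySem

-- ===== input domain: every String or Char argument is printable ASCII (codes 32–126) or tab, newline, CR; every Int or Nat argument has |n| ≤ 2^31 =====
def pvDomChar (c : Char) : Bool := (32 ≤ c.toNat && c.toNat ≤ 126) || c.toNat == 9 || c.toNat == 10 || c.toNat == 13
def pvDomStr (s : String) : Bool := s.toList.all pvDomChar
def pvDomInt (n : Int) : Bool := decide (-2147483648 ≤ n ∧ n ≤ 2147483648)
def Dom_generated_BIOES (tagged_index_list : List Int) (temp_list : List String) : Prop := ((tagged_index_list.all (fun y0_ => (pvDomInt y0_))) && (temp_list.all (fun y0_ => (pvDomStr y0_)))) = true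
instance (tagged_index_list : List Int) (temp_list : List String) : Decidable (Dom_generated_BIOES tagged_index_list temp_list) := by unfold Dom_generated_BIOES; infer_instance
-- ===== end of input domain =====

-- B replaces A's four length-based branches by building the whole BIOES tag string once
-- and zipping it with the index list in one pass (objective: simpler; same cost).
-- A mutates temp_list in place in Python; the equivalence proved here is about the return value.

-- ===== PORT A =====
def generated_BIOES (tagged_index_list : List Int) (temp_list : List String) : List String :=
  -- `if len == 0: temp_list = temp_list` is a no-op
  let t1 := if tagged_index_list.length = 1 then
      PySem.List.pySetD temp_list (PySem.List.pyGetD tagged_index_list 0 0) "S"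
    else temp_list
  let t2 := if tagged_index_list.length = 2 then
      PySem.List.pySetD (PySem.List.pySetD t1 (PySem.List.pyGetD tagged_index_list 0 0) "B")
        (PySem.List.pyGetD tagged_index_list 1 0) "E"
    else t1
  if tagged_index_list.length > 2 then
      let tB := PySem.List.pySetD t2 (PySem.List.pyGetD tagged_index_list 0 0) "B"
      let tI := (PySem.List.slice tagged_index_list (some 1) (some (-1))).foldl
        (fun acc i => PySem.List.pySetD acc i "I") tB
      PySem.List.pySetD tI (PySem.List.pyGetD tagged_index_list (-1) 0) "E"
    else t2

-- ===== PORT B =====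
def generated_BIOES_alt (tagged_index_list : List Int) (temp_list : List String) : List String :=
  let n := tagged_index_list.length
  let tags : List Char :=
    if n = 1 then ['S']
    else if n ≥ 2 then 'B' :: (List.replicate (n - 2) 'I' ++ ['E'])
    else []
  (tagged_index_list.zip tags).foldl
    (fun acc p => PySem.List.pySetD acc p.1 (String.ofList [p.2])) temp_list

-- ===== PRECONDITION & SPEC =====
-- Pre_ excludes exactly the inputs where Python A raises IndexError: some tagged index out of range.
def Pre_generated_BIOES (tagged_index_list : List Int) (temp_list : List String) : Prop :=
  ∀ i ∈ tagged_index_list, PySem.Raise.InRange temp_list.length i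
instance (tagged_index_list : List Int) (temp_list : List String) : Decidable (Pre_generated_BIOES tagged_index_list temp_list) := by unfold Pre_generated_BIOES; infer_instance
def pvWitness_generated_BIOES : List Int × List String := ([0, 2, 1], ["O", "O", "O"])

def Spec_generated_BIOES (tagged_index_list : List Int) (temp_list : List String) (out : List String) : Prop := out = generated_BIOES_alt tagged_index_list temp_list
instance (tagged_index_list : List Int) (temp_list : List String) (out : List String) : Decidable (Spec_generated_BIOES tagged_index_list temp_list out) := by unfold Spec_generated_BIOES; infer_instance

-- ===== CLAIM (what is proved, stated in full; the proofs are below) =====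
def Claim_equal_generated_BIOES : Prop := ∀ (tagged_index_list : List Int) (temp_list : List String), Dom_generated_BIOES tagged_index_list temp_list → Pre_generated_BIOES tagged_index_list temp_list → Spec_generated_BIOES tagged_index_list temp_list (generated_BIOES tagged_index_list temp_list)

-- ===== LEMMAS AND PROOFS =====

-- Folding the middle indices zipped with all-'I' tags is folding them with "I".
theorem foldl_zip_replicate_I (mid : List Int) (acc : List String) :
    ((mid.zip (List.replicate mid.length 'I')).foldl
        (fun acc p => PySem.List.pySetD acc p.1 (String.ofList [p.2])) acc)
      = mid.foldl (fun acc i => PySem.List.pySetD acc i "I") acc := by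
  induction mid generalizing acc with
  | nil => rfl
  | cons x xs ih =>
    simp only [List.length_cons, List.replicate_succ, List.zip_cons_cons, List.foldl_cons]
    rw [ih]

-- xs[1:-1] is the tail without its last element (for xs long enough).
theorem slice_one_negone (xs : List Int) (h : 3 ≤ xs.length) :
    PySem.List.slice xs (some 1) (some (-1)) = xs.tail.dropLast := by
  simp only [PySem.List.slice, PySem.List.clampIdx]
  norm_num
  have h0 : xs ≠ [] := by intro hh; subst hh; simp at h
  have h1 : min 1 xs.length = 1 := by omega
  have h2 : (↑xs.length + (-1:Int)).toNat = xs.length - 1 := by omega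
  rw [if_neg h0, h1, h2, ← List.drop_one, List.dropLast_eq_take, List.length_drop]

theorem pyGetD_head (a : Int) (xs : List Int) :
    PySem.List.pyGetD (a :: xs) 0 0 = a := by
  simp [PySem.List.pyGetD, PySem.List.pyGet?, PySem.List.pyIdx?]

theorem pyGetD_last (xs : List Int) (y : Int) :
    PySem.List.pyGetD (xs ++ [y]) (-1) 0 = y := by
  simp [PySem.List.pyGetD, PySem.List.pyGet?, PySem.List.pyIdx?]

-- ===== VERDICT (by name: the statement is the Claim_ definition above) =====
theorem generated_BIOES_spec : Claim_equal_generated_BIOES := by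
  intro tl temp _ _
  unfold Spec_generated_BIOES generated_BIOES generated_BIOES_alt
  match tl with
  | [] => simp
  | [a] => simp [PySem.List.pyGetD, PySem.List.pyGet?, PySem.List.pyIdx?, List.zip]
  | [a, b] =>
    simp [PySem.List.pyGetD, PySem.List.pyGet?, PySem.List.pyIdx?, List.zip]
  | a :: b :: c :: rest =>
    simp only [List.length_cons, ge_iff_le]
    split_ifs with h1 h2 h3 h4 h5 h6 h7 h8 h9 h10 h11 <;> try omega
    -- decompose the tail as middle ++ [last]
    obtain ⟨mid, y, hmy⟩ : ∃ mid y, b :: c :: rest = mid ++ [y] :=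
      ⟨(b :: c :: rest).dropLast, (b :: c :: rest).getLast (by simp),
        (List.dropLast_append_getLast (by simp)).symm⟩
    have hmidlen : mid.length = rest.length + 1 := by
      have := congrArg List.length hmy; simp at this; omega
    have hslice : PySem.List.slice (a :: b :: c :: rest) (some 1) (some (-1)) = mid := by
      rw [slice_one_negone _ (by simp)]
      simp [hmy]
    have hlast : PySem.List.pyGetD (a :: b :: c :: rest) (-1) 0 = y := by
      have hh : a :: b :: c :: rest = (a :: mid) ++ [y] := by rw [hmy]; rfl
      rw [hh, pyGetD_last]
    rw [hslice, pyGetD_head, hlast]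
    have htl : a :: b :: c :: rest = a :: (mid ++ [y]) := by rw [hmy]
    rw [htl]
    have hrep : rest.length + 1 + 1 + 1 - 2 = mid.length := by omega
    rw [hrep]
    have hzip : (a :: (mid ++ [y])).zip ('B' :: (List.replicate mid.length 'I' ++ ['E']))
        = (a, 'B') :: (mid.zip (List.replicate mid.length 'I') ++ [(y, 'E')]) := by
      rw [List.zip_cons_cons, List.zip_append (by simp)]
      rfl
    rw [hzip]
    simp only [List.foldl_cons, List.foldl_append, List.foldl_nil]
    rw [foldl_zip_replicate_I]
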